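-- pv_equiv track=rewrite | github.com/Timurbtr23/Matfyz | Programovani_1/simmetry_of_matrices.py | symmetry_secondary_diagonal
-- ===== SOURCE A (Python) =====
-- def symmetry_secondary_diagonal(_matrix, dimension):
--     symmetry = 0
--     for i in range(0, dimension):
--         for j in range(0, dimension):
--             if (i + j != dimension - 1) and (_matrix[i][j] == _matrix[dimension - j - 1][dimension - i - 1]):
--                 symmetry += 1
--     if symmetry == dimension * (dimension - 1):
--         return 1
--     else:
--         return 0
-- ===== SOURCE B (Python) =====
-- def symmetry_secondary_diagonal(_matrix, dimension):
--     block = [row[:dimension] for row in _matrix[:dimension]]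
--     reflected = [[block[dimension - 1 - j][dimension - 1 - i] for j in range(dimension)]
--                  for i in range(dimension)]
--     return 1 if block == reflected else 0
-- ===== Notes on version B (the rewrite author's own statement) =====
-- stated objective: alternative
-- what changed: Instead of counting every off-anti-diagonal match over all dimension^2 cells and comparing the count to dimension*(dimension-1), B materialises the reflection of the cropped n-by-n block about the secondary diagonal and returns 1 iff the block equals its reflection (diagonal cells are their own mirror, so whole-matrix equality is the same condition).
-- outside the precondition, e.g. on symmetry_secondary_diagonal([], -1): A returns 0, B returns 1; on symmetry_secondary_diagonal([], 1): A returns 1, B raises IndexError; on symmetry_secondary_diagonal([[1], [3, 1]], 2): A returns 1, B raises IndexError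
import Mathlib
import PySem

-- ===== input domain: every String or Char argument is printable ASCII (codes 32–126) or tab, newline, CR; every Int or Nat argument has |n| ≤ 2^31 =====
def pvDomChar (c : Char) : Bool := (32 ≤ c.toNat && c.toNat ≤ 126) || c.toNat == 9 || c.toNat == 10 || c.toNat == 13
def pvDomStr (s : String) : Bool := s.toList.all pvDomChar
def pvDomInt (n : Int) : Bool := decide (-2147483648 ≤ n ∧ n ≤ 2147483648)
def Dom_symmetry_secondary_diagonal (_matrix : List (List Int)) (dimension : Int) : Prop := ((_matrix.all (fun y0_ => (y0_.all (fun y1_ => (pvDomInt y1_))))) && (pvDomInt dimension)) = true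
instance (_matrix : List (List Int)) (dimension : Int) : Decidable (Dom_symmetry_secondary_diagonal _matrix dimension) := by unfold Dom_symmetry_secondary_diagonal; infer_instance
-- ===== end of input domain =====

-- B crops the leading dimension×dimension block, materialises its reflection about the secondary
-- diagonal, and compares the two matrices for equality, instead of counting off-anti-diagonal
-- matches and comparing the count to dimension*(dimension-1) (alternative decomposition, same cost).

-- ===== PORT A =====
def symmetry_secondary_diagonal (_matrix : List (List Int)) (dimension : Int) : Int :=
  let symmetry : Int :=
    (PySem.List.pyRange 0 dimension 1).foldl (fun s i =>
      (PySem.List.pyRange 0 dimension 1).foldl (fun s j =>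
        if i + j ≠ dimension - 1 ∧
            PySem.List.pyGetD (PySem.List.pyGetD _matrix i []) j 0 =
              PySem.List.pyGetD (PySem.List.pyGetD _matrix (dimension - j - 1) []) (dimension - i - 1) 0
        then s + 1 else s) s) 0
  if symmetry = dimension * (dimension - 1) then 1 else 0

-- ===== PORT B =====
-- Python's block[k][l] raises IndexError out of range; pyGetD's default is only reached outside Pre_.
def symmetry_secondary_diagonal_alt (_matrix : List (List Int)) (dimension : Int) : Int :=
  let block := (PySem.List.slice _matrix none (some dimension)).map
      (fun row => PySem.List.slice row none (some dimension))
  let reflected := (PySem.List.pyRange 0 dimension 1).map (fun i =>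
      (PySem.List.pyRange 0 dimension 1).map (fun j =>
        PySem.List.pyGetD (PySem.List.pyGetD block (dimension - 1 - j) []) (dimension - 1 - i) 0))
  if block = reflected then 1 else 0

-- ===== PRECONDITION & SPEC =====
-- Pre_ excludes matrices whose leading dimension×dimension block is incomplete (B reads every cell
-- of the block, IndexError on a missing one, while A skips exactly the anti-diagonal cells, so A
-- still returns on a block missing only those) and negative dimensions so large that the negative
-- slice empties the matrix (there A returns 0 from its empty count while B compares two empty lists
-- and returns 1).
def Pre_symmetry_secondary_diagonal (_matrix : List (List Int)) (dimension : Int) : Prop :=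
  (0 ≤ dimension ∧ dimension.toNat ≤ _matrix.length ∧
    ∀ k < dimension.toNat, dimension.toNat ≤ (_matrix.getD k []).length) ∨
  (dimension < 0 ∧ 0 < dimension + (_matrix.length : Int))
instance (_matrix : List (List Int)) (dimension : Int) : Decidable (Pre_symmetry_secondary_diagonal _matrix dimension) := by unfold Pre_symmetry_secondary_diagonal; infer_instance

def pvWitness_symmetry_secondary_diagonal : List (List Int) × Int := ([[1, 2], [3, 1]], 2)

def Spec_symmetry_secondary_diagonal (_matrix : List (List Int)) (dimension : Int) (out : Int) : Prop := out = symmetry_secondary_diagonal_alt _matrix dimension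
instance (_matrix : List (List Int)) (dimension : Int) (out : Int) : Decidable (Spec_symmetry_secondary_diagonal _matrix dimension out) := by unfold Spec_symmetry_secondary_diagonal; infer_instance

-- ===== CLAIM (what is proved, stated in full; the proofs are below) =====
def Claim_equal_symmetry_secondary_diagonal : Prop := ∀ (_matrix : List (List Int)) (dimension : Int), Dom_symmetry_secondary_diagonal _matrix dimension → Pre_symmetry_secondary_diagonal _matrix dimension → Spec_symmetry_secondary_diagonal _matrix dimension (symmetry_secondary_diagonal _matrix dimension)

-- ===== LEMMAS AND PROOFS =====

-- the matrix entry at (i, j), with getD defaults (in range under Pre_ where the algebra needs it)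
def pvAux (m : List (List Int)) (i j : Nat) : Int := (m.getD i []).getD j 0

-- a foldl that adds 1 when p holds IS countP
theorem pv_foldl_count {α : Type} (p : α → Prop) [DecidablePred p] (L : List α) (s : Int) :
    L.foldl (fun s x => if p x then s + 1 else s) s = s + ((L.countP fun x => decide (p x) : Nat) : Int) := by
  induction L generalizing s with
  | nil => simp
  | cons a t ih => by_cases h : p a <;> simp [ih, h] <;> omega

-- a foldl adding f x IS the sum of the map
theorem pv_foldl_add {α : Type} (f : α → Int) (L : List α) (s : Int) :
    L.foldl (fun s x => s + f x) s = s + (L.map f).sum := by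
  induction L generalizing s with
  | nil => simp
  | cons a t ih => simp [ih]; ring

-- if p implies q on L, the counts agree iff q implies p on L
theorem pv_countP_eq_iff {α : Type} (p q : α → Bool) (L : List α)
    (h : ∀ x ∈ L, p x → q x) :
    (L.countP p = L.countP q) ↔ ∀ x ∈ L, q x → p x := by
  induction L with
  | nil => simp
  | cons a t ih =>
    have hle : t.countP p ≤ t.countP q :=
      List.countP_mono_left (fun x hx => h x (List.mem_cons_of_mem a hx))
    have iht := ih (fun x hx => h x (List.mem_cons_of_mem a hx))
    have ha := h a List.mem_cons_self
    rw [List.countP_cons, List.countP_cons, List.forall_mem_cons]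
    by_cases hp : p a
    · have hq : q a := ha hp
      rw [if_pos hp, if_pos hq]
      constructor
      · intro he
        exact ⟨fun _ => hp, iht.mp (by omega)⟩
      · rintro ⟨-, h2⟩
        have := iht.mpr h2
        omega
    · by_cases hq : q a
      · rw [if_neg hp, if_pos hq]
        constructor
        · intro he
          exact absurd he (by omega)
        · rintro ⟨h1, -⟩
          exact absurd (h1 hq) hp
      · rw [if_neg hp, if_neg hq]
        constructor
        · intro he
          exact ⟨fun hqa => absurd hqa hq, iht.mp (by omega)⟩
        · rintro ⟨-, h2⟩
          have := iht.mpr h2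
          omega

-- pointwise ≤ makes sums equal iff the functions agree on the list
theorem pv_sum_map_eq_iff {α : Type} (L : List α) (f g : α → Nat)
    (h : ∀ x ∈ L, f x ≤ g x) :
    ((L.map f).sum = (L.map g).sum) ↔ ∀ x ∈ L, f x = g x := by
  induction L with
  | nil => simp
  | cons a t ih =>
    have hle : (t.map f).sum ≤ (t.map g).sum :=
      List.sum_le_sum (fun x hx => h x (List.mem_cons_of_mem a hx))
    have iht := ih (fun x hx => h x (List.mem_cons_of_mem a hx))
    have ha := h a List.mem_cons_self
    simp only [List.map_cons, List.sum_cons, List.mem_cons]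
    constructor
    · intro he
      have hfa : f a = g a ∧ (t.map f).sum = (t.map g).sum := by omega
      exact fun x hx => hx.elim (fun hx => hx ▸ hfa.1) (iht.mp hfa.2 x)
    · intro hh
      have := iht.mpr (fun x hx => hh x (Or.inr hx))
      rw [hh a (Or.inl rfl), this]

-- among range n, exactly one j has i + j = n - 1 (for i < n)
theorem pv_countQ (n i : Nat) (hi : i < n) :
    (List.range n).countP (fun j => decide (i + j ≠ n - 1)) = n - 1 := by
  have h1 : (List.range n).countP (fun j => decide (i + j = n - 1)) = 1 := by
    have he : (List.range n).countP (fun j => decide (i + j = n - 1))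
        = (List.range n).countP (fun j => j == n - 1 - i) := by
      apply List.countP_congr
      intro j hj
      have hj' := List.mem_range.mp hj
      by_cases hc : j = n - 1 - i
      · subst hc
        simp only [beq_self_eq_true, decide_eq_true_eq, iff_true]
        omega
      · have hne : ¬ (i + j = n - 1) := by omega
        simp [hne, hc]
    rw [he, ← List.count_eq_countP, List.Nodup.count List.nodup_range]
    have hm : n - 1 - i ∈ List.range n := List.mem_range.mpr (by omega)
    simp [hm]
  have hsplit := List.length_eq_countP_add_countP
    (p := fun j => decide (i + j = n - 1)) (l := List.range n)
  have h2 : (List.range n).countP (fun j => decide (i + j ≠ n - 1))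
      = (List.range n).countP (fun a => decide (¬ (decide (i + a = n - 1)) = true)) := by
    apply List.countP_congr
    intro j _
    simp
  simp only [List.length_range] at hsplit
  omega

-- A's count equals n*(n-1) iff every off-anti-diagonal pair matches
theorem pv_sum_counts (n : Nat) (R : Nat → Nat → Prop) [inst : ∀ i j, Decidable (R i j)] :
    (((List.range n).map (fun i =>
        (List.range n).countP (fun j => decide (i + j ≠ n - 1 ∧ R i j)))).sum = n * (n - 1))
    ↔ ∀ i < n, ∀ j < n, i + j ≠ n - 1 → R i j := by
  have himp : ∀ i : Nat, ∀ j ∈ List.range n,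
      decide (i + j ≠ n - 1 ∧ R i j) → decide (i + j ≠ n - 1) := by
    intro i j _ h
    simp only [decide_eq_true_eq] at *
    exact h.1
  have hle : ∀ i ∈ List.range n,
      (List.range n).countP (fun j => decide (i + j ≠ n - 1 ∧ R i j))
        ≤ (List.range n).countP (fun j => decide (i + j ≠ n - 1)) := by
    intro i _
    exact List.countP_mono_left (himp i)
  have hconst : ((List.range n).map (fun i =>
      (List.range n).countP (fun j => decide (i + j ≠ n - 1)))).sum = n * (n - 1) := by
    have he : ((List.range n).map (fun i =>
        (List.range n).countP (fun j => decide (i + j ≠ n - 1)))).sum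
        = ((List.range n).map (fun _ => n - 1)).sum := by
      apply congrArg
      apply List.map_congr_left
      intro i hi
      exact pv_countQ n i (List.mem_range.mp hi)
    rw [he]; simp [List.map_const', List.sum_replicate]
  rw [← hconst, pv_sum_map_eq_iff _ _ _ hle]
  constructor
  · intro h i hi j hj hd
    have h' := (pv_countP_eq_iff _ _ _ (himp i)).mp (h i (List.mem_range.mpr hi))
    have h'' := h' j (List.mem_range.mpr hj) (by simpa using hd)
    simp only [decide_eq_true_eq] at h''
    exact h''.2
  · intro h i hi
    apply (pv_countP_eq_iff _ _ _ (himp i)).mpr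
    intro j hj hq
    simp only [decide_eq_true_eq] at *
    exact ⟨hq, h i (List.mem_range.mp hi) j (List.mem_range.mp hj) hq⟩

-- A in closed Nat form
theorem pv_A_eq (m : List (List Int)) (n : Nat) :
    symmetry_secondary_diagonal m (n : Int)
    = if (∀ i < n, ∀ j < n, i + j ≠ n - 1 → pvAux m i j = pvAux m (n - 1 - j) (n - 1 - i)) then 1 else 0 := by
  have hinner : ∀ iN ∈ List.range n, ∀ s : Int,
      (List.range n).foldl (fun (s : Int) (jN : Nat) =>
        if ((iN : Int) + (jN : Int) ≠ (n : Int) - 1 ∧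
            PySem.List.pyGetD (PySem.List.pyGetD m (iN : Int) []) (jN : Int) 0 =
              PySem.List.pyGetD (PySem.List.pyGetD m ((n : Int) - (jN : Int) - 1) []) ((n : Int) - (iN : Int) - 1) 0)
        then s + 1 else s) s
      = s + (((List.range n).countP (fun jN => decide (iN + jN ≠ n - 1 ∧
          pvAux m iN jN = pvAux m (n - 1 - jN) (n - 1 - iN))) : Nat) : Int) := by
    intro iN hiN s
    have hiN' := List.mem_range.mp hiN
    rw [pv_foldl_count]
    congr 2
    apply List.countP_congr
    intro jN hjN
    have hjN' := List.mem_range.mp hjN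
    have e1 : ((n : Int) - (jN : Int) - 1) = ((n - 1 - jN : Nat) : Int) := by omega
    have e2 : ((n : Int) - (iN : Int) - 1) = ((n - 1 - iN : Nat) : Int) := by omega
    rw [e1, e2]
    simp only [PySem.List.pyGetD_natCast, decide_eq_true_eq, pvAux]
    constructor
    · rintro ⟨h1, h2⟩; exact ⟨by omega, h2⟩
    · rintro ⟨h1, h2⟩; exact ⟨by omega, h2⟩
  simp only [symmetry_secondary_diagonal, PySem.List.pyRange_zero_natCast, List.foldl_map]
  rw [PySem.List.foldl_congr_mem (List.range n) _ (fun (s : Int) iN =>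
      s + (((List.range n).countP (fun jN => decide (iN + jN ≠ n - 1 ∧
        pvAux m iN jN = pvAux m (n - 1 - jN) (n - 1 - iN))) : Nat) : Int)) 0
      (fun s iN hiN => hinner iN hiN s)]
  rw [pv_foldl_add, zero_add]
  have hcast : ∀ (f : Nat → Nat), ((List.range n).map (fun iN => ((f iN : Nat) : Int))).sum
      = (((List.range n).map f).sum : Int) := by
    intro f
    rw [Nat.cast_list_sum, List.map_map]
    rfl
  rw [hcast (fun iN => (List.range n).countP (fun jN => decide (iN + jN ≠ n - 1 ∧
        pvAux m iN jN = pvAux m (n - 1 - jN) (n - 1 - iN))))]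
  have hmul : ((n : Int) * ((n : Int) - 1)) = ((n * (n - 1) : Nat) : Int) := by
    rcases Nat.eq_zero_or_pos n with h | h
    · subst h; simp
    · push_cast [Nat.cast_sub h]; ring
  simp only [hmul, Int.natCast_inj]
  exact if_congr (pv_sum_counts n _) rfl rfl

-- B in closed Nat form, on a complete n×n block
theorem pv_B_eq (m : List (List Int)) (n : Nat)
    (hm : n ≤ m.length) (hr : ∀ k < n, n ≤ (m.getD k []).length) :
    symmetry_secondary_diagonal_alt m (n : Int)
    = if (∀ i < n, ∀ j < n, pvAux m i j = pvAux m (n - 1 - j) (n - 1 - i)) then 1 else 0 := by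
  simp only [symmetry_secondary_diagonal_alt, PySem.List.slice_to_natCast,
    PySem.List.pyRange_zero_natCast, List.map_map, Function.comp_def]
  set block := List.map (fun row => List.take n row) (List.take n m) with hblock
  have hbl : block.length = n := by
    simp [hblock, List.length_take]; omega
  have hrowlen : ∀ k, (hk : k < n) → (block.getD k []).length = n := by
    intro k hk
    have hk' : k < block.length := by omega
    rw [List.getD_eq_getElem block [] hk']
    simp only [hblock, List.getElem_map, List.getElem_take, List.length_take]
    have := hr k hk
    rw [List.getD_eq_getElem m [] (by omega)] at this
    omega
  have hentry : ∀ k l, k < n → l < n → (block.getD k []).getD l 0 = pvAux m k l := by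
    intro k l hk hl
    have hk' : k < block.length := by omega
    rw [List.getD_eq_getElem block [] hk']
    simp only [hblock, List.getElem_map, List.getElem_take]
    have hlen : n ≤ m[k].length := by
      have := hr k hk
      rwa [List.getD_eq_getElem m [] (by omega)] at this
    rw [List.getD_eq_getElem _ _ (by simp [List.length_take]; omega),
      List.getElem_take, pvAux, List.getD_eq_getElem m [] (by omega),
      List.getD_eq_getElem _ _ (by omega)]
  have hreflentry : ∀ i j, i < n → j < n →
      PySem.List.pyGetD (PySem.List.pyGetD block ((n : Int) - 1 - (j : Int)) []) ((n : Int) - 1 - (i : Int)) 0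
        = pvAux m (n - 1 - j) (n - 1 - i) := by
    intro i j hi hj
    have e1 : ((n : Int) - 1 - (j : Int)) = ((n - 1 - j : Nat) : Int) := by omega
    have e2 : ((n : Int) - 1 - (i : Int)) = ((n - 1 - i : Nat) : Int) := by omega
    rw [e1, e2]
    simp only [PySem.List.pyGetD_natCast]
    exact hentry _ _ (by omega) (by omega)
  have hiff : (block = (List.range n).map (fun (iN : Nat) => (List.range n).map (fun (jN : Nat) =>
        PySem.List.pyGetD (PySem.List.pyGetD block ((n : Int) - 1 - (jN : Int)) []) ((n : Int) - 1 - (iN : Int)) 0)))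
      ↔ (∀ i < n, ∀ j < n, pvAux m i j = pvAux m (n - 1 - j) (n - 1 - i)) := by
    constructor
    · intro he i hi j hj
      have hgd : (block.getD i []).getD j 0
          = (((List.range n).map (fun (iN : Nat) => (List.range n).map (fun (jN : Nat) =>
              PySem.List.pyGetD (PySem.List.pyGetD block ((n : Int) - 1 - (jN : Int)) []) ((n : Int) - 1 - (iN : Int)) 0))).getD i []).getD j 0 := by
        rw [← he]
      rw [hentry i j hi hj,
        List.getD_eq_getElem _ [] (by simp; omega)] at hgd
      simp only [List.getElem_map, List.getElem_range] at hgd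
      rw [List.getD_eq_getElem _ _ (by simp; omega)] at hgd
      simp only [List.getElem_map, List.getElem_range] at hgd
      rw [hreflentry i j hi hj] at hgd
      exact hgd
    · intro h
      apply List.ext_getElem
      · simp [hbl]
      · intro i hi1 hi2
        have hi : i < n := by omega
        apply List.ext_getElem
        · have hl := hrowlen i hi
          rw [List.getD_eq_getElem block [] (by omega)] at hl
          simp [hl]
        · intro j hj1 hj2
          have hj : j < n := by
            have hl := hrowlen i hi
            rw [List.getD_eq_getElem block [] (by omega)] at hl
            omega
          simp only [List.getElem_map, List.getElem_range]
          rw [hreflentry i j hi hj]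
          have hent := hentry i j hi hj
          rw [List.getD_eq_getElem block [] (by omega),
              List.getD_eq_getElem _ _ (by
                have hl := hrowlen i hi
                rw [List.getD_eq_getElem block [] (by omega)] at hl
                omega)] at hent
          rw [hent]
          exact h i hi j hj
  exact if_congr hiff rfl rfl

-- the anti-diagonal cells are their own mirror, so the full-grid and off-diagonal conditions agree
theorem pv_bridge (m : List (List Int)) (n : Nat) :
    (∀ i < n, ∀ j < n, i + j ≠ n - 1 → pvAux m i j = pvAux m (n - 1 - j) (n - 1 - i))
    ↔ (∀ i < n, ∀ j < n, pvAux m i j = pvAux m (n - 1 - j) (n - 1 - i)) := by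
  constructor
  · intro h i hi j hj
    by_cases hd : i + j = n - 1
    · have e1 : n - 1 - j = i := by omega
      have e2 : n - 1 - i = j := by omega
      rw [e1, e2]
    · exact h i hi j hj hd
  · intro h i hi j hj _
    exact h i hi j hj

-- with a negative dimension both loops are empty: A's count 0 misses d*(d-1) > 0, and B's nonempty
-- cropped block differs from the empty reflection, so both return 0
theorem pv_neg (m : List (List Int)) (d : Int) (hd : d < 0) (hlen : 0 < d + (m.length : Int)) :
    symmetry_secondary_diagonal m d = 0 ∧ symmetry_secondary_diagonal_alt m d = 0 := by
  constructor
  · simp only [symmetry_secondary_diagonal]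
    rw [PySem.List.pyRange_one_eq_nil (by omega)]
    simp only [List.foldl_nil]
    rw [if_neg (by
      have hpos := mul_pos_of_neg_of_neg hd (show d - 1 < 0 by omega)
      omega)]
  · simp only [symmetry_secondary_diagonal_alt]
    rw [PySem.List.pyRange_one_eq_nil (by omega)]
    simp only [List.map_nil]
    obtain ⟨k, hk, rfl⟩ : ∃ k : Nat, 0 < k ∧ d = -(k : Int) := ⟨(-d).toNat, by omega, by omega⟩
    rw [PySem.List.slice_to_neg_natCast m k hk]
    rw [if_neg (by
      intro h
      have hl := congrArg List.length h
      simp [List.length_take] at hl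
      omega)]

-- ===== VERDICT (by name: the statement is the Claim_ definition above) =====
theorem symmetry_secondary_diagonal_spec : Claim_equal_symmetry_secondary_diagonal := by
  intro m d _ hpre
  unfold Spec_symmetry_secondary_diagonal
  rcases hpre with ⟨hd, hm, hr⟩ | ⟨hd, hlen⟩
  · obtain ⟨n, rfl⟩ : ∃ n : Nat, d = (n : Int) := ⟨d.toNat, (Int.toNat_of_nonneg hd).symm⟩
    simp only [Int.toNat_natCast] at hm hr
    rw [pv_A_eq, pv_B_eq m n hm hr, if_congr (pv_bridge m n) rfl rfl]
  · obtain ⟨h1, h2⟩ := pv_neg m d hd hlen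
    rw [h1, h2]
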